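-- pv_equiv track=rewrite | github.com/Spud304/eveindyapp | src/industry.py | _discover_blueprints
-- ===== SOURCE A (Python) =====
-- def _discover_blueprints(
--     blueprint_type_id: int,
--     discovered: set,
--     materials_by_bp: dict,
--     products_by_product: dict,
--     blacklist: set = None,
-- ) -> set:
--     """DFS to find all blueprint type IDs in the build tree."""
--     if blueprint_type_id in discovered:
--         return discovered
--     discovered.add(blueprint_type_id)
--     for material_type_id, _ in materials_by_bp.get(blueprint_type_id, []):
--         if blacklist and material_type_id in blacklist:
--             continue
--         sub = products_by_product.get(material_type_id)
--         if sub: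
--             _discover_blueprints(
--                 sub[0], discovered, materials_by_bp, products_by_product, blacklist
--             )
--     return discovered
-- ===== SOURCE B (Python) =====
-- def _discover_blueprints(
--     blueprint_type_id: int,
--     discovered: set,
--     materials_by_bp: dict,
--     products_by_product: dict,
--     blacklist: set = None,
-- ) -> set:
--     """Iterative DFS (explicit stack) over the build tree; same discovered set."""
--     stack = [blueprint_type_id]
--     while stack:
--         node = stack.pop()
--         if node in discovered:
--             continue
--         discovered.add(node)
--         for material_type_id, _ in reversed(materials_by_bp.get(node, [])):
--             if blacklist and material_type_id in blacklist:
--                 continue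
--             sub = products_by_product.get(material_type_id)
--             if sub:
--                 stack.append(sub[0])
--     return discovered
-- ===== Notes on version B (the rewrite author's own statement) =====
-- stated objective: alternative
-- what changed: The recursive DFS over the build tree is replaced by an iterative DFS with an explicit stack (initialized with the root; children pushed in reverse so the visit order is preserved), removing recursion entirely.
import Mathlib
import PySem

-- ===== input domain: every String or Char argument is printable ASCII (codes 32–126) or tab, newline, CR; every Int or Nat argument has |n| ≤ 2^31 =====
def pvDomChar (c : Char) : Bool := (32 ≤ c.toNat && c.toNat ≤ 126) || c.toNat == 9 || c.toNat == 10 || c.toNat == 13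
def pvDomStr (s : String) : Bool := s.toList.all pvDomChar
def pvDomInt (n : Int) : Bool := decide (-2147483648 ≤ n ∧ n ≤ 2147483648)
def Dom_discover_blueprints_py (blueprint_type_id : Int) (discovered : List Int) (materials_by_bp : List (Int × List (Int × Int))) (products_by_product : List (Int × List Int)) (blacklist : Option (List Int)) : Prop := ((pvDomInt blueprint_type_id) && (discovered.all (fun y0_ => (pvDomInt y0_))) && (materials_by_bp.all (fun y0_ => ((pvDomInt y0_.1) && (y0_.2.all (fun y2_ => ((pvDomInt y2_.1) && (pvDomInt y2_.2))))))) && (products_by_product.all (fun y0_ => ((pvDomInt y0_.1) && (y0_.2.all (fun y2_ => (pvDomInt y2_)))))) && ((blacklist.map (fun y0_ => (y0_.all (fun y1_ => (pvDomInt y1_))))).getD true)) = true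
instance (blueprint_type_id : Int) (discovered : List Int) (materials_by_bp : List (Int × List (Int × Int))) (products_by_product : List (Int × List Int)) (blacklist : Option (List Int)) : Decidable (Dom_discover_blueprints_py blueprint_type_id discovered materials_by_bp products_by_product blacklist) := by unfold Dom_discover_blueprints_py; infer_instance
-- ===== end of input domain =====

-- B replaces A's recursive DFS by an iterative explicit-stack DFS (same visit order, same set);
-- objective: alternative decomposition, no speed claim. Python A and B mutate `discovered` in
-- place identically (both add exactly the discovered ids); the equivalence proved here is about
-- the returned set.

-- `blacklist and material_type_id in blacklist` (shared by both ports)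
def pvBlHit (blacklist : Option (List Int)) (m : Int) : Bool :=
  match blacklist with
  | some bl => !bl.isEmpty && bl.contains m
  | none => false

-- ===== PORT A =====
-- Recursive DFS, state-passing for the mutated `discovered` set; the Nat argument is a fuel
-- guard for totality only (`discover_blueprints_py` supplies provably sufficient fuel).
def pvGoA (mats : List (Int × List (Int × Int))) (prods : List (Int × List Int)) (bl : Option (List Int)) : Nat → Int → List Int → List Int
  | 0, _, disc => disc
  | fuel+1, b, disc =>
    if disc.contains b then disc
    else
      ((PySem.Dict.mk mats).getD b []).foldl
        (fun d p =>
          if pvBlHit bl p.1 then d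
          else
            match (PySem.Dict.mk prods).get? p.1 with
            | some (s0 :: _) => pvGoA mats prods bl fuel s0 d
            | _ => d)
        (PySem.Set.add disc b)

def discover_blueprints_py (blueprint_type_id : Int) (discovered : List Int) (materials_by_bp : List (Int × List (Int × Int))) (products_by_product : List (Int × List Int)) (blacklist : Option (List Int)) : List Int :=
  pvGoA materials_by_bp products_by_product blacklist (products_by_product.length + 3) blueprint_type_id discovered

-- ===== PORT B =====
-- loop body of Source B: `if blacklist and m in blacklist: continue; sub = products.get(m); if sub: push sub[0]`
def pvChild (prods : List (Int × List Int)) (bl : Option (List Int)) (m : Int) : Option Int :=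
  if pvBlHit bl m then none
  else
    match (PySem.Dict.mk prods).get? m with
    | some (s0 :: _) => some s0
    | _ => none

-- all ids the loop can ever push (used only in pvGoB's termination measure)
def pvPool (prods : List (Int × List Int)) : List Int := prods.filterMap (fun e => e.2.head?)

-- lemmas cited by pvGoB's decreasing_by
theorem pvChild_mem_pool (prods : List (Int × List Int)) (bl : Option (List Int)) (m c : Int)
    (h : pvChild prods bl m = some c) : c ∈ pvPool prods := by
  unfold pvChild at h
  split_ifs at h
  cases hg : (PySem.Dict.mk prods).get? m with
  | none => rw [hg] at h; simp at h
  | some v =>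
    rw [hg] at h
    cases v with
    | nil => simp at h
    | cons s0 rest =>
      simp at h
      subst h
      have hmem := PySem.Dict.mem_items_of_get?_eq_some _ hg
      exact List.mem_filterMap.mpr ⟨(m, s0 :: rest), hmem, rfl⟩

theorem pvPush_mem (prods : List (Int × List Int)) (bl : Option (List Int)) :
    ∀ (ms : List (Int × Int)) (st : List Int) (y : Int),
      y ∈ ms.foldl (fun st p => match pvChild prods bl p.1 with | some c => c :: st | none => st) st →
      y ∈ pvPool prods ∨ y ∈ st := by
  intro ms
  induction ms with
  | nil => intro st y h; exact Or.inr h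
  | cons m t ih =>
    intro st y h
    simp only [List.foldl_cons] at h
    cases hc : pvChild prods bl m.1 with
    | none => rw [hc] at h; exact ih st y h
    | some c =>
      rw [hc] at h
      rcases ih (c :: st) y h with hp | hst
      · exact Or.inl hp
      · rcases List.mem_cons.mp hst with rfl | hst'
        · exact Or.inl (pvChild_mem_pool prods bl m.1 y hc)
        · exact Or.inr hst'

theorem pvAdd_toFinset (d : List Int) (x : Int) :
    (PySem.Set.add d x).toFinset = insert x d.toFinset := by
  by_cases h : x ∈ d
  · have : PySem.Set.add d x = d := by
      unfold PySem.Set.add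
      rw [if_pos (by simpa using h)]
    rw [this]
    exact (Finset.insert_eq_self.mpr (List.mem_toFinset.mpr h)).symm
  · have : PySem.Set.add d x = d ++ [x] := by
      unfold PySem.Set.add
      rw [if_neg (by simpa using h)]
    rw [this]
    simp [List.toFinset_append]

-- Iterative DFS with an explicit stack (head = top); terminates unconditionally: every
-- iteration either shortens the stack or discovers a new id out of the finite pool.
def pvGoB (mats : List (Int × List (Int × Int))) (prods : List (Int × List Int)) (bl : Option (List Int)) : List Int → List Int → List Int
  | [], disc => disc
  | x :: rest, disc =>
    if disc.contains x then pvGoB mats prods bl rest disc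
    else
      pvGoB mats prods bl
        (((PySem.Dict.mk mats).getD x []).reverse.foldl
          (fun st p => match pvChild prods bl p.1 with | some c => c :: st | none => st) rest)
        (PySem.Set.add disc x)
termination_by stack disc => ((((pvPool prods).toFinset ∪ stack.toFinset) \ disc.toFinset).card, stack.length)
decreasing_by
  · -- pop an already-discovered id: measure component 1 does not grow, component 2 shrinks
    have hsub : ((pvPool prods).toFinset ∪ rest.toFinset) \ disc.toFinset ⊆
        ((pvPool prods).toFinset ∪ (x :: rest).toFinset) \ disc.toFinset := by
      apply (Finset.sdiff_subset_sdiff · (Finset.Subset.refl _))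
      apply Finset.union_subset_union_right
      intro y hy
      simp only [List.mem_toFinset] at hy ⊢
      exact List.mem_cons_of_mem x hy
    have hle := Finset.card_le_card hsub
    rcases lt_or_eq_of_le hle with hlt | heq
    · exact Prod.Lex.left _ _ hlt
    · rw [heq]; exact Prod.Lex.right _ (by simp)
  · -- discover x: x leaves the measured set, nothing outside the old set enters
    rename_i hx
    apply Prod.Lex.left
    apply Finset.card_lt_card
    constructor
    · intro y hy
      rcases Finset.mem_sdiff.mp hy with ⟨hyin, hynot⟩
      rw [pvAdd_toFinset] at hynot
      apply Finset.mem_sdiff.mpr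
      refine ⟨?_, fun hc => hynot (Finset.mem_insert_of_mem hc)⟩
      rcases Finset.mem_union.mp hyin with hp | hst
      · exact Finset.mem_union_left _ hp
      · rcases pvPush_mem prods bl _ rest y (List.mem_toFinset.mp hst) with hp | hr
        · exact Finset.mem_union_left _ (List.mem_toFinset.mpr hp)
        · exact Finset.mem_union_right _ (List.mem_toFinset.mpr (List.mem_cons_of_mem x hr))
    · intro hall
      have hxin : x ∈ ((pvPool prods).toFinset ∪ (x :: rest).toFinset) \ disc.toFinset := by
        apply Finset.mem_sdiff.mpr
        constructor
        · exact Finset.mem_union_right _ (List.mem_toFinset.mpr (List.mem_cons_self))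
        · intro hc
          exact absurd (List.contains_iff_mem.mpr (List.mem_toFinset.mp hc)) (by simpa using hx)
      have := hall hxin
      rcases Finset.mem_sdiff.mp this with ⟨_, hnot⟩
      exact hnot (by rw [pvAdd_toFinset]; exact Finset.mem_insert_self _ _)

def discover_blueprints_py_alt (blueprint_type_id : Int) (discovered : List Int) (materials_by_bp : List (Int × List (Int × Int))) (products_by_product : List (Int × List Int)) (blacklist : Option (List Int)) : List Int :=
  pvGoB materials_by_bp products_by_product blacklist [blueprint_type_id] discovered

-- ===== PRECONDITION & SPEC =====
def Spec_discover_blueprints_py (blueprint_type_id : Int) (discovered : List Int) (materials_by_bp : List (Int × List (Int × Int))) (products_by_product : List (Int × List Int)) (blacklist : Option (List Int)) (out : List Int) : Prop := out = discover_blueprints_py_alt blueprint_type_id discovered materials_by_bp products_by_product blacklist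
instance (blueprint_type_id : Int) (discovered : List Int) (materials_by_bp : List (Int × List (Int × Int))) (products_by_product : List (Int × List Int)) (blacklist : Option (List Int)) (out : List Int) : Decidable (Spec_discover_blueprints_py blueprint_type_id discovered materials_by_bp products_by_product blacklist out) := by unfold Spec_discover_blueprints_py; infer_instance

-- ===== CLAIM (what is proved, stated in full; the proofs are below) =====
def Claim_equal_discover_blueprints_py : Prop := ∀ (blueprint_type_id : Int) (discovered : List Int) (materials_by_bp : List (Int × List (Int × Int))) (products_by_product : List (Int × List Int)) (blacklist : Option (List Int)), Dom_discover_blueprints_py blueprint_type_id discovered materials_by_bp products_by_product blacklist → Spec_discover_blueprints_py blueprint_type_id discovered materials_by_bp products_by_product blacklist (discover_blueprints_py blueprint_type_id discovered materials_by_bp products_by_product blacklist)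

-- ===== LEMMAS AND PROOFS =====

-- Option-valued shadow of pvGoA: `none` exactly when the fuel runs out.  All reasoning about
-- A's recursion is done on it; pvOGoA_sound transfers the result to the total port.
def pvOGoA (mats : List (Int × List (Int × Int))) (prods : List (Int × List Int)) (bl : Option (List Int)) : Nat → Int → List Int → Option (List Int)
  | 0, _, _ => none
  | fuel+1, b, disc =>
    if disc.contains b then some disc
    else
      ((PySem.Dict.mk mats).getD b []).foldlM
        (fun d p =>
          if pvBlHit bl p.1 then some d
          else
            match (PySem.Dict.mk prods).get? p.1 with
            | some (s0 :: _) => pvOGoA mats prods bl fuel s0 d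
            | _ => some d)
        (PySem.Set.add disc b)

theorem pvBindSome {α β : Type} (a : α) (f : α → Option β) : (some a >>= f) = f a := rfl

-- generic facts about Option-foldl loops
theorem pvFoldAgree {α : Type} (stepO : List Int → α → Option (List Int)) (step : List Int → α → List Int)
    (h : ∀ d p x, stepO d p = some x → step d p = x) :
    ∀ (ms : List α) (d r : List Int), ms.foldlM stepO d = some r → ms.foldl step d = r := by
  intro ms
  induction ms with
  | nil => intro d r hr; simp only [List.foldl_nil]; exact Option.some.inj hr
  | cons m t ih =>
    intro d r hr
    simp only [List.foldlM_cons] at hr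
    cases hs : stepO d m with
    | none => rw [hs] at hr; simp at hr
    | some d1 =>
      rw [hs] at hr
      simp only [pvBindSome, List.foldl_cons] at hr ⊢
      rw [h d m d1 hs]
      exact ih d1 r hr

theorem pvFoldSub {α : Type} (stepO : List Int → α → Option (List Int))
    (h : ∀ d p x, stepO d p = some x → d ⊆ x) :
    ∀ (ms : List α) (d r : List Int), ms.foldlM stepO d = some r → d ⊆ r := by
  intro ms
  induction ms with
  | nil => intro d r hr; exact (Option.some.inj hr) ▸ List.Subset.refl d
  | cons m t ih =>
    intro d r hr
    simp only [List.foldlM_cons] at hr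
    cases hs : stepO d m with
    | none => rw [hs] at hr; simp at hr
    | some d1 =>
      rw [hs] at hr
      simp only [pvBindSome] at hr
      exact List.Subset.trans (h d m d1 hs) (ih d1 r hr)

theorem pvFoldMono {α : Type} (stepO stepO' : List Int → α → Option (List Int))
    (h : ∀ d p x, stepO d p = some x → stepO' d p = some x) :
    ∀ (ms : List α) (d r : List Int), ms.foldlM stepO d = some r → ms.foldlM stepO' d = some r := by
  intro ms
  induction ms with
  | nil => intro d r hr; simpa using hr
  | cons m t ih =>
    intro d r hr
    simp only [List.foldlM_cons] at hr ⊢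
    cases hs : stepO d m with
    | none => rw [hs] at hr; simp at hr
    | some d1 =>
      rw [hs] at hr
      simp only [pvBindSome] at hr
      rw [h d m d1 hs]
      simp only [pvBindSome]
      exact ih d1 r hr

theorem pvSubset_add (d : List Int) (x : Int) : d ⊆ PySem.Set.add d x := by
  intro y hy
  simp [PySem.Set.mem_add]
  exact Or.inl hy

theorem pvOGoA_sound (mats : List (Int × List (Int × Int))) (prods : List (Int × List Int)) (bl : Option (List Int)) :
    ∀ (fuel : Nat) (b : Int) (d r : List Int),
      pvOGoA mats prods bl fuel b d = some r → pvGoA mats prods bl fuel b d = r := by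
  intro fuel
  induction fuel with
  | zero => intro b d r h; simp [pvOGoA] at h
  | succ fuel ih =>
    intro b d r h
    rw [pvOGoA] at h
    rw [pvGoA]
    split_ifs at h ⊢ with hc
    · simpa using h
    · refine pvFoldAgree _ _ ?_ _ _ _ h
      intro d' p x hx
      split_ifs at hx ⊢
      · simpa using hx
      · cases hg : (PySem.Dict.mk prods).get? p.1 with
        | none => rw [hg] at hx; simpa using hx
        | some v =>
          rw [hg] at hx
          cases v with
          | nil => simpa using hx
          | cons s0 rest => exact ih s0 d' x hx

theorem pvOGoA_subset (mats : List (Int × List (Int × Int))) (prods : List (Int × List Int)) (bl : Option (List Int)) :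
    ∀ (fuel : Nat) (b : Int) (d r : List Int),
      pvOGoA mats prods bl fuel b d = some r → d ⊆ r := by
  intro fuel
  induction fuel with
  | zero => intro b d r h; simp [pvOGoA] at h
  | succ fuel ih =>
    intro b d r h
    rw [pvOGoA] at h
    split_ifs at h with hc
    · injection h with h'; exact h' ▸ List.Subset.refl d
    · refine List.Subset.trans (pvSubset_add d b) (pvFoldSub _ ?_ _ _ _ h)
      intro d' p x hx
      split_ifs at hx
      · injection hx with h'; exact h' ▸ List.Subset.refl d'
      · cases hg : (PySem.Dict.mk prods).get? p.1 with
        | none => rw [hg] at hx; injection hx with h'; exact h' ▸ List.Subset.refl d'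
        | some v =>
          rw [hg] at hx
          cases v with
          | nil => injection hx with h'; exact h' ▸ List.Subset.refl d'
          | cons s0 rest => exact ih s0 d' x hx

theorem pvOGoA_mono_succ (mats : List (Int × List (Int × Int))) (prods : List (Int × List Int)) (bl : Option (List Int)) :
    ∀ (fuel : Nat) (b : Int) (d r : List Int),
      pvOGoA mats prods bl fuel b d = some r → pvOGoA mats prods bl (fuel + 1) b d = some r := by
  intro fuel
  induction fuel with
  | zero => intro b d r h; simp [pvOGoA] at h
  | succ fuel ih =>
    intro b d r h
    rw [pvOGoA] at h
    rw [pvOGoA]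
    split_ifs at h ⊢ with hc
    · exact h
    · refine pvFoldMono _ _ ?_ _ _ _ h
      intro d' p x hx
      split_ifs at hx ⊢
      · exact hx
      · cases hg : (PySem.Dict.mk prods).get? p.1 with
        | none => rw [hg] at hx; exact hx
        | some v =>
          rw [hg] at hx
          cases v with
          | nil => exact hx
          | cons s0 rest => exact ih s0 d' x hx

theorem pvOGoA_mono (mats : List (Int × List (Int × Int))) (prods : List (Int × List Int)) (bl : Option (List Int)) :
    ∀ (fuel fuel' : Nat), fuel ≤ fuel' → ∀ (b : Int) (d r : List Int),
      pvOGoA mats prods bl fuel b d = some r → pvOGoA mats prods bl fuel' b d = some r := by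
  intro fuel fuel' hle
  induction fuel' , hle using Nat.le_induction with
  | base => intro b d r h; exact h
  | succ n hn ih => intro b d r h; exact pvOGoA_mono_succ mats prods bl n b d r (ih b d r h)

theorem pvCardMono (prods : List (Int × List Int)) (d d' : List Int) (h : d ⊆ d') :
    (((pvPool prods).toFinset \ d'.toFinset)).card ≤ (((pvPool prods).toFinset \ d.toFinset)).card := by
  apply Finset.card_le_card
  apply (Finset.sdiff_subset_sdiff (Finset.Subset.refl _) ·)
  intro y hy
  exact List.mem_toFinset.mpr (h (List.mem_toFinset.mp hy))

-- loop sufficiency: if every pool id can be processed from any state extending d, the loop returns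
theorem pvSL (mats : List (Int × List (Int × Int))) (prods : List (Int × List Int)) (bl : Option (List Int)) (f : Nat) :
    ∀ (ms : List (Int × Int)) (d : List Int),
      (∀ (b' : Int) (d' : List Int), b' ∈ pvPool prods → d ⊆ d' → (pvOGoA mats prods bl f b' d').isSome) →
      ∃ r, ms.foldlM
        (fun d p =>
          if pvBlHit bl p.1 then some d
          else
            match (PySem.Dict.mk prods).get? p.1 with
            | some (s0 :: _) => pvOGoA mats prods bl f s0 d
            | _ => some d) d = some r ∧ d ⊆ r := by
  intro ms
  induction ms with
  | nil => intro d hyp; exact ⟨d, by simp, List.Subset.refl d⟩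
  | cons m t ih =>
    intro d hyp
    by_cases hbl : pvBlHit bl m.1
    · obtain ⟨r, hr, hsub⟩ := ih d hyp
      exact ⟨r, by simp only [List.foldlM_cons, if_pos hbl, pvBindSome]; exact hr, hsub⟩
    · cases hg : (PySem.Dict.mk prods).get? m.1 with
      | none =>
        obtain ⟨r, hr, hsub⟩ := ih d hyp
        exact ⟨r, by simp only [List.foldlM_cons, if_neg hbl, hg, pvBindSome]; exact hr, hsub⟩
      | some v =>
        cases v with
        | nil =>
          obtain ⟨r, hr, hsub⟩ := ih d hyp
          exact ⟨r, by simp only [List.foldlM_cons, if_neg hbl, hg, pvBindSome]; exact hr, hsub⟩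
        | cons s0 rest =>
          have hs0 : s0 ∈ pvPool prods := by
            apply pvChild_mem_pool prods bl m.1
            simp [pvChild, hbl, hg]
          have hsome := hyp s0 d hs0 (List.Subset.refl d)
          obtain ⟨d1, hd1⟩ := Option.isSome_iff_exists.mp hsome
          have hd1sub : d ⊆ d1 := pvOGoA_subset mats prods bl f s0 d d1 hd1
          obtain ⟨r, hr, hsub⟩ := ih d1 (fun b' d' hb' hdd' => hyp b' d' hb' (List.Subset.trans hd1sub hdd'))
          refine ⟨r, ?_, List.Subset.trans hd1sub hsub⟩
          simp only [List.foldlM_cons, if_neg hbl, hg, hd1, pvBindSome]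
          exact hr

theorem pvS (mats : List (Int × List (Int × Int))) (prods : List (Int × List Int)) (bl : Option (List Int)) :
    ∀ (n : Nat) (b : Int) (d : List Int), b ∈ pvPool prods →
      (((pvPool prods).toFinset \ d.toFinset)).card ≤ n →
      (pvOGoA mats prods bl (n + 2) b d).isSome := by
  intro n
  induction n using Nat.strong_induction_on with
  | _ n ihn =>
    intro b d hb hcard
    by_cases hc : d.contains b
    · rw [pvOGoA]
      simp [show b ∈ d by simpa using hc]
    · have hbf : b ∈ (pvPool prods).toFinset \ d.toFinset := by
        apply Finset.mem_sdiff.mpr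
        refine ⟨List.mem_toFinset.mpr hb, fun hmem => ?_⟩
        exact absurd (List.contains_iff_mem.mpr (List.mem_toFinset.mp hmem)) (by simpa using hc)
      have hpos : 1 ≤ (((pvPool prods).toFinset \ d.toFinset)).card := Finset.card_pos.mpr ⟨b, hbf⟩
      obtain ⟨m, rfl⟩ : ∃ m, n = m + 1 := ⟨n - 1, by omega⟩
      have hloop := pvSL mats prods bl (m + 2) ((PySem.Dict.mk mats).getD b []) (PySem.Set.add d b) ?_
      · obtain ⟨r, hr, _⟩ := hloop
        rw [pvOGoA]
        rw [if_neg (by simpa using hc)]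
        rw [hr]
        rfl
      · intro b' d' hb' hdd'
        have hsub : PySem.Set.add d b ⊆ d' := hdd'
        have hcard' : (((pvPool prods).toFinset \ d'.toFinset)).card ≤ m := by
          have h1 := pvCardMono prods (PySem.Set.add d b) d' hsub
          have h2 : ((pvPool prods).toFinset \ (PySem.Set.add d b).toFinset) ⊆
              ((pvPool prods).toFinset \ d.toFinset).erase b := by
            rw [pvAdd_toFinset]
            intro y hy
            rcases Finset.mem_sdiff.mp hy with ⟨hyp1, hyp2⟩
            apply Finset.mem_erase.mpr
            refine ⟨fun hyb => hyp2 (hyb ▸ Finset.mem_insert_self _ _), Finset.mem_sdiff.mpr ⟨hyp1, fun hc' => hyp2 (Finset.mem_insert_of_mem hc')⟩⟩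
          have h3 := Finset.card_le_card h2
          rw [Finset.card_erase_of_mem hbf] at h3
          omega
        exact ihn m (by omega) b' d' hb' hcard'

theorem pvSuffTop (mats : List (Int × List (Int × Int))) (prods : List (Int × List Int)) (bl : Option (List Int)) :
    ∀ (b : Int) (d : List Int),
      (pvOGoA mats prods bl (prods.length + 3) b d).isSome := by
  intro b d
  by_cases hc : d.contains b
  · rw [pvOGoA]; simp [show b ∈ d by simpa using hc]
  · have hloop := pvSL mats prods bl (prods.length + 2) ((PySem.Dict.mk mats).getD b []) (PySem.Set.add d b) ?_
    · obtain ⟨r, hr, _⟩ := hloop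
      show (pvOGoA mats prods bl (prods.length + 2 + 1) b d).isSome
      rw [pvOGoA]
      rw [if_neg (by simpa using hc)]
      rw [hr]
      rfl
    · intro b' d' hb' _
      have hcard : (((pvPool prods).toFinset \ d'.toFinset)).card ≤ prods.length := by
        calc (((pvPool prods).toFinset \ d'.toFinset)).card
            ≤ (pvPool prods).toFinset.card := Finset.card_le_card (Finset.sdiff_subset)
          _ ≤ (pvPool prods).length := List.toFinset_card_le _
          _ ≤ prods.length := List.length_filterMap_le _ _
      have := pvS mats prods bl (((pvPool prods).toFinset \ d'.toFinset)).card b' d' hb' le_rfl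
      obtain ⟨r, hr⟩ := Option.isSome_iff_exists.mp this
      exact Option.isSome_iff_exists.mpr ⟨r, pvOGoA_mono mats prods bl _ _ (by omega) b' d' r hr⟩

-- pushing the reversed material list = prepending the (in-order) child list
theorem pvPush_eq (prods : List (Int × List Int)) (bl : Option (List Int)) :
    ∀ (ms : List (Int × Int)) (st : List Int),
      ms.reverse.foldl (fun st p => match pvChild prods bl p.1 with | some c => c :: st | none => st) st =
      ms.filterMap (fun p => pvChild prods bl p.1) ++ st := by
  intro ms
  induction ms with
  | nil => intro st; simp
  | cons m t ih =>
    intro st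
    simp only [List.reverse_cons, List.foldl_append, List.foldl_cons, List.foldl_nil, ih st]
    cases hc : pvChild prods bl m.1 with
    | none => simp [hc]
    | some c => simp [hc]

-- the bridge: one fully-fuelled recursive call of A = processing the top stack entry in B
theorem pvBR (mats : List (Int × List (Int × Int))) (prods : List (Int × List Int)) (bl : Option (List Int)) :
    ∀ (fuel : Nat) (x : Int) (disc r : List Int),
      pvOGoA mats prods bl fuel x disc = some r →
      ∀ (stack : List Int), pvGoB mats prods bl (x :: stack) disc = pvGoB mats prods bl stack r := by
  intro fuel
  induction fuel using Nat.strong_induction_on with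
  | _ fuel ihf =>
    match fuel with
    | 0 => intro x disc r h; simp [pvOGoA] at h
    | fuel + 1 =>
      intro x disc r h stack
      rw [pvOGoA] at h
      by_cases hc : disc.contains x
      · rw [if_pos hc] at h
        injection h with h'
        rw [pvGoB, if_pos hc, h']
      · rw [if_neg hc] at h
        rw [pvGoB, if_neg hc, pvPush_eq]
        -- inner loop: the fold of A over the materials = B consuming the pushed children
        have loop : ∀ (t : List (Int × Int)) (d r' : List Int) (st : List Int),
            t.foldlM
              (fun d p =>
                if pvBlHit bl p.1 then some d
                else
                  match (PySem.Dict.mk prods).get? p.1 with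
                  | some (s0 :: _) => pvOGoA mats prods bl fuel s0 d
                  | _ => some d) d = some r' →
            pvGoB mats prods bl (t.filterMap (fun p => pvChild prods bl p.1) ++ st) d =
            pvGoB mats prods bl st r' := by
          intro t
          induction t with
          | nil =>
            intro d r' st hr
            obtain rfl : d = r' := Option.some.inj hr
            simp
          | cons m t' ih =>
            intro d r' st hr
            simp only [List.foldlM_cons] at hr
            by_cases hbl : pvBlHit bl m.1
            · rw [if_pos hbl] at hr
              simp only [pvBindSome] at hr
              have hcm : pvChild prods bl m.1 = none := by simp [pvChild, hbl]
              simp only [List.filterMap_cons, hcm]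
              exact ih d r' st hr
            · rw [if_neg hbl] at hr
              cases hg : (PySem.Dict.mk prods).get? m.1 with
              | none =>
                rw [hg] at hr
                simp only [pvBindSome] at hr
                have hcm : pvChild prods bl m.1 = none := by simp [pvChild, hbl, hg]
                simp only [List.filterMap_cons, hcm]
                exact ih d r' st hr
              | some v =>
                rw [hg] at hr
                cases v with
                | nil =>
                  simp only [pvBindSome] at hr
                  have hcm : pvChild prods bl m.1 = none := by simp [pvChild, hbl, hg]
                  simp only [List.filterMap_cons, hcm]
                  exact ih d r' st hr
                | cons s0 rest =>
                  replace hr : (pvOGoA mats prods bl fuel s0 d >>=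
                      fun d' => t'.foldlM
                        (fun d p =>
                          if pvBlHit bl p.1 then some d
                          else
                            match (PySem.Dict.mk prods).get? p.1 with
                            | some (s0 :: _) => pvOGoA mats prods bl fuel s0 d
                            | _ => some d) d') = some r' := hr
                  cases hstep : pvOGoA mats prods bl fuel s0 d with
                  | none => rw [hstep] at hr; simp at hr
                  | some d1 =>
                    rw [hstep] at hr
                    simp only [pvBindSome] at hr
                    have hcm : pvChild prods bl m.1 = some s0 := by simp [pvChild, hbl, hg]
                    simp only [List.filterMap_cons, hcm, List.cons_append]
                    rw [ihf fuel (Nat.lt_succ_self fuel) s0 d d1 hstep]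
                    exact ih d1 r' st hr
        exact loop ((PySem.Dict.mk mats).getD x []) (PySem.Set.add disc x) r stack h

theorem pvGoB_nil (mats : List (Int × List (Int × Int))) (prods : List (Int × List Int)) (bl : Option (List Int)) (d : List Int) :
    pvGoB mats prods bl [] d = d := by rw [pvGoB]

-- ===== VERDICT (by name: the statement is the Claim_ definition above) =====
theorem discover_blueprints_py_spec : Claim_equal_discover_blueprints_py := by
  intro b disc mats prods bl _
  unfold Spec_discover_blueprints_py discover_blueprints_py discover_blueprints_py_alt
  obtain ⟨r, hr⟩ := Option.isSome_iff_exists.mp (pvSuffTop mats prods bl b disc)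
  rw [pvOGoA_sound mats prods bl _ b disc r hr]
  rw [pvBR mats prods bl _ b disc r hr [], pvGoB_nil]
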